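-- pv_equiv track=rewrite | github.com/jianqiaomo/anno_1 | simulate/compile_gate_range.py | _find_easy_ranges_count_two
-- ===== SOURCE A (Python) =====
-- def _find_easy_ranges_count_two(count_two_pairs):
--     if not count_two_pairs:
--         return []
--     normalized = sorted((u, tuple(sorted(gs))) for u, gs in count_two_pairs)
--     ranges = []
--     start_u, start_gs = normalized[0]
--     prev_u, prev_gs = normalized[0]
--     deltas = (start_gs[0] - start_u, start_gs[1] - start_u)
--
--     for u, gs in normalized[1:]:
--         next_deltas = (gs[0] - u, gs[1] - u)
--         if (
--             u == prev_u + 1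
--             and gs[0] == prev_gs[0] + 1
--             and gs[1] == prev_gs[1] + 1
--             and next_deltas == deltas
--         ):
--             prev_u, prev_gs = u, gs
--             continue
--         if prev_u > start_u:
--             ranges.append((start_u, prev_u + 1))
--         start_u, start_gs = u, gs
--         prev_u, prev_gs = u, gs
--         deltas = (start_gs[0] - start_u, start_gs[1] - start_u)
--
--     if prev_u > start_u:
--         ranges.append((start_u, prev_u + 1))
--     return ranges
-- ===== SOURCE B (Python) =====
-- def _find_easy_ranges_count_two(count_two_pairs):
--     if not count_two_pairs:
--         return []
--     normalized = sorted((u, tuple(sorted(gs))) for u, gs in count_two_pairs)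
--     n = len(normalized)
--     # position-normalized key: constant exactly along a maximal arithmetic run
--     keys = [(u - i, gs[0] - u, gs[1] - u) for i, (u, gs) in enumerate(normalized)]
--     # boundaries of the maximal equal-key groups
--     cuts = [0] + [i for i in range(1, n) if keys[i] != keys[i - 1]] + [n]
--     return [(normalized[s][0], normalized[e - 1][0] + 1)
--             for s, e in zip(cuts, cuts[1:]) if e - s >= 2]
-- ===== Notes on version B (the rewrite author's own statement) =====
-- stated objective: alternative
-- what changed: A's single stateful scan (six loop variables tracking start/prev pairs and a cached delta tuple, testing +1 adjacency element-by-element) is replaced by a groupby-style staged pipeline: each sorted element gets a position-normalized key (u - index, g0 - u, g1 - u) that is constant exactly along a maximal arithmetic run, group boundaries are the indices where consecutive keys differ, and ranges are emitted by zipping the boundary list with itself for groups of length >= 2.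
import Mathlib
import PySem

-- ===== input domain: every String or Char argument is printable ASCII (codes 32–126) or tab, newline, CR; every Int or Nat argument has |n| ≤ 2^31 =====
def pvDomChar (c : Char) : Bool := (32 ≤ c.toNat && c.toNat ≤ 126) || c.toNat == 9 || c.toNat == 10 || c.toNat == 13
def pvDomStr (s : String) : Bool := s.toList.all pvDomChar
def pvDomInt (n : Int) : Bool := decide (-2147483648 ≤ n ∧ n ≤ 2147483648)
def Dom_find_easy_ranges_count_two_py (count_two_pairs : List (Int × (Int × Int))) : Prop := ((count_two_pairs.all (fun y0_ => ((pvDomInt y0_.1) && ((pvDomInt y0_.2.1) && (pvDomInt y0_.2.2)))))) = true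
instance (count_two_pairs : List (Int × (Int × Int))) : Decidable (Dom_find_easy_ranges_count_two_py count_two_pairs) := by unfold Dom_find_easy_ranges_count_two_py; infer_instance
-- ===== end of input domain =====

-- B replaces A's single stateful scan (six loop variables, element-by-element +1 adjacency tests)
-- by a groupby-style staged pipeline over the same sorted list: position-normalized keys, then the
-- list of group-boundary indices, then ranges from zipped boundary pairs of width >= 2.
-- An alternative decomposition, same cost (the sort dominates both).

-- ===== PORT A =====

-- (u, tuple(sorted(gs))): Python's sorted on a 2-list swaps exactly when the second is smaller
def pvNorm (p : Int × (Int × Int)) : Int × (Int × Int) :=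
  (p.1, if p.2.2 < p.2.1 then (p.2.2, p.2.1) else p.2)

-- Python compares the tuples (u, (g0, g1)) lexicographically: key into the Lex order
def pvKey (p : Int × (Int × Int)) : Lex (Int × Lex (Int × Int)) := toLex (p.1, toLex p.2)

-- the for-loop of A, state = (ranges, start_u, start_gs, prev_u, prev_gs, deltas)
def loopA : List (Int × (Int × Int)) → List (Int × Int) → Int → (Int × Int) → Int → (Int × Int) →
    (Int × Int) → List (Int × Int)
  | [], ranges, start_u, _, prev_u, _, _ =>
      if prev_u > start_u then ranges ++ [(start_u, prev_u + 1)] else ranges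
  | (u, gs) :: rest, ranges, start_u, start_gs, prev_u, prev_gs, deltas =>
      let next_deltas := (gs.1 - u, gs.2 - u)
      if u = prev_u + 1 ∧ gs.1 = prev_gs.1 + 1 ∧ gs.2 = prev_gs.2 + 1 ∧ next_deltas = deltas then
        loopA rest ranges start_u start_gs u gs deltas
      else
        loopA rest (if prev_u > start_u then ranges ++ [(start_u, prev_u + 1)] else ranges)
          u gs u gs (gs.1 - u, gs.2 - u)

def find_easy_ranges_count_two_py (count_two_pairs : List (Int × (Int × Int))) : List (Int × Int) :=
  if count_two_pairs = [] then []
  else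
    match PySem.List.sorted (count_two_pairs.map pvNorm) pvKey false with
    | [] => []  -- unreachable: sorted of a nonempty list is nonempty
    | h :: t => loopA t [] h.1 h.2 h.1 h.2 (h.2.1 - h.1, h.2.2 - h.1)

-- ===== PORT B =====

-- the position-normalized key (u - i, gs[0] - u, gs[1] - u)
def pvKeyOf (i : Int) (p : Int × (Int × Int)) : Int × Int × Int :=
  (p.1 - i, p.2.1 - p.1, p.2.2 - p.1)

-- keys = [(u - i, gs[0] - u, gs[1] - u) for i, (u, gs) in enumerate(normalized)]
def pvKeys (ns : List (Int × (Int × Int))) : List (Int × Int × Int) :=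
  (PySem.List.enumerate ns 0).map (fun ip => pvKeyOf ip.1 ip.2)

-- cuts = [0] + [i for i in range(1, n) if keys[i] != keys[i - 1]] + [n]
-- (keys[i] is always in range here; pyGetD with a dummy default is exact)
def pvCuts (ns : List (Int × (Int × Int))) : List Int :=
  [0] ++ ((PySem.List.pyRange 1 (ns.length : Int) 1).filter
    (fun i => !(PySem.List.pyGetD (pvKeys ns) i (0, 0, 0) ==
                PySem.List.pyGetD (pvKeys ns) (i - 1) (0, 0, 0)))) ++ [(ns.length : Int)]

-- the final comprehension over zip(cuts, cuts[1:]); normalized[s], normalized[e-1] in range: pyGetD exact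
def pvBcore (ns : List (Int × (Int × Int))) : List (Int × Int) :=
  (((pvCuts ns).zip (PySem.List.slice (pvCuts ns) (some 1) none)).filter
      (fun p => decide (2 ≤ p.2 - p.1))).map
    (fun p => ((PySem.List.pyGetD ns p.1 (0, (0, 0))).1,
               (PySem.List.pyGetD ns (p.2 - 1) (0, (0, 0))).1 + 1))

def find_easy_ranges_count_two_py_alt (count_two_pairs : List (Int × (Int × Int))) : List (Int × Int) :=
  if count_two_pairs = [] then []
  else pvBcore (PySem.List.sorted (count_two_pairs.map pvNorm) pvKey false)

-- ===== PRECONDITION & SPEC =====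
def Spec_find_easy_ranges_count_two_py (count_two_pairs : List (Int × (Int × Int))) (out : List (Int × Int)) : Prop := out = find_easy_ranges_count_two_py_alt count_two_pairs
instance (count_two_pairs : List (Int × (Int × Int))) (out : List (Int × Int)) : Decidable (Spec_find_easy_ranges_count_two_py count_two_pairs out) := by unfold Spec_find_easy_ranges_count_two_py; infer_instance

-- ===== CLAIM (what is proved, stated in full; the proofs are below) =====
def Claim_equal_find_easy_ranges_count_two_py : Prop := ∀ (count_two_pairs : List (Int × (Int × Int))), Dom_find_easy_ranges_count_two_py count_two_pairs → Spec_find_easy_ranges_count_two_py count_two_pairs (find_easy_ranges_count_two_py count_two_pairs)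

-- ===== LEMMAS AND PROOFS =====

-- adjacency: u and both gate values each advance by exactly 1
def pvAdj (p q : Int × (Int × Int)) : Bool :=
  q.1 == p.1 + 1 && q.2.1 == p.2.1 + 1 && q.2.2 == p.2.2 + 1

-- maximal adjacent run after p: (elements of the run after p, the rest of the list)
def pvSplitRun (p : Int × (Int × Int)) : List (Int × (Int × Int)) →
    List (Int × (Int × Int)) × List (Int × (Int × Int))
  | [] => ([], [])
  | q :: qs =>
      if pvAdj p q then
        let s := pvSplitRun q qs
        (q :: s.1, s.2)
      else ([], q :: qs)

theorem pvSplitRun_rest_length (p : Int × (Int × Int)) (xs : List (Int × (Int × Int))) :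
    (pvSplitRun p xs).2.length ≤ xs.length := by
  induction xs generalizing p with
  | nil => simp [pvSplitRun]
  | cons q qs ih =>
      simp only [pvSplitRun]
      split
      · exact le_trans (ih q) (Nat.le_succ _)
      · simp

-- canonical run-peeling recursion: the bridge both ports are reduced to
def loopB : List (Int × (Int × Int)) → List (Int × Int)
  | [] => []
  | x :: xs =>
      let s := pvSplitRun x xs
      (match s.1.getLast? with
       | none => []                       -- run of length 1: no range
       | some l => [(x.1, l.1 + 1)]) ++ loopB s.2
termination_by l => l.length
decreasing_by
  simpa using Nat.lt_succ_of_le (pvSplitRun_rest_length x xs)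

-- A's emission step, written as a list
def pvEmit (su lu : Int) : List (Int × Int) := if lu > su then [(su, lu + 1)] else []

-- the u of the last element of the run starting at p
def pvLastU (p : Int × (Int × Int)) (xs : List (Int × (Int × Int))) : Int :=
  (((pvSplitRun p xs).1.getLast?).getD p).1

theorem pvSplitRun_last_gt (xs : List (Int × (Int × Int))) (p l : Int × (Int × Int))
    (h : (pvSplitRun p xs).1.getLast? = some l) : p.1 < l.1 := by
  induction xs generalizing p with
  | nil => simp [pvSplitRun] at h
  | cons q qs ih =>
      simp only [pvSplitRun] at h
      by_cases hq : pvAdj p q = true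
      · rw [if_pos hq] at h
        have hpq : p.1 < q.1 := by
          simp only [pvAdj, Bool.and_eq_true, beq_iff_eq] at hq; omega
        rcases he : (pvSplitRun q qs).1 with _ | ⟨a, as⟩
        · rw [he] at h
          simp only [List.getLast?_singleton, Option.some.injEq] at h
          subst h
          exact hpq
        · rw [he, List.getLast?_cons_cons] at h
          rw [← he] at h
          exact lt_trans hpq (ih q h)
      · rw [if_neg hq] at h
        simp at h

theorem loopB_cons (x : Int × (Int × Int)) (xs : List (Int × (Int × Int))) :
    loopB (x :: xs) = pvEmit x.1 (pvLastU x xs) ++ loopB (pvSplitRun x xs).2 := by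
  rw [loopB]
  rcases h : (pvSplitRun x xs).1.getLast? with _ | l
  · simp [pvEmit, pvLastU, h]
  · have := pvSplitRun_last_gt xs x l h
    simp [pvEmit, pvLastU, h, this]

theorem loopB_nil : loopB [] = [] := by rw [loopB]

theorem loopA_eq (xs : List (Int × (Int × Int))) (ranges : List (Int × Int)) (su : Int)
    (sgs : Int × Int) (pu : Int) (pgs : Int × Int) :
    loopA xs ranges su sgs pu pgs (pgs.1 - pu, pgs.2 - pu) =
      ranges ++ pvEmit su (pvLastU (pu, pgs) xs) ++ loopB (pvSplitRun (pu, pgs) xs).2 := by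
  induction xs generalizing ranges su sgs pu pgs with
  | nil => simp [loopA, pvSplitRun, pvLastU, pvEmit, loopB_nil]; split <;> simp
  | cons q qs ih =>
      rcases q with ⟨u, gs⟩
      have hcond : (u = pu + 1 ∧ gs.1 = pgs.1 + 1 ∧ gs.2 = pgs.2 + 1 ∧
          (gs.1 - u, gs.2 - u) = (pgs.1 - pu, pgs.2 - pu)) ↔ pvAdj (pu, pgs) (u, gs) = true := by
        simp only [pvAdj, Bool.and_eq_true, beq_iff_eq, Prod.mk.injEq]
        constructor
        · rintro ⟨h1, h2, h3, _⟩; exact ⟨⟨h1, h2⟩, h3⟩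
        · rintro ⟨⟨h1, h2⟩, h3⟩; refine ⟨h1, h2, h3, by omega, by omega⟩
      by_cases hadj : pvAdj (pu, pgs) (u, gs) = true
      · have hc := hcond.mpr hadj
        simp only [pvAdj, Bool.and_eq_true, beq_iff_eq] at hadj
        simp only [loopA, if_pos hc]
        have hd : (pgs.1 - pu, pgs.2 - pu) = (gs.1 - u, gs.2 - u) := by
          simp only [Prod.mk.injEq]; omega
        rw [hd, ih]
        have hs : pvSplitRun (pu, pgs) ((u, gs) :: qs) =
            ((u, gs) :: (pvSplitRun (u, gs) qs).1, (pvSplitRun (u, gs) qs).2) := by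
          simp only [pvSplitRun]
          rw [if_pos (by simp [pvAdj]; omega)]
        rw [hs]
        have hl : pvLastU (pu, pgs) ((u, gs) :: qs) = pvLastU (u, gs) qs := by
          simp only [pvLastU, hs]
          rcases he : (pvSplitRun (u, gs) qs).1 with _ | ⟨a, as⟩
          · simp
          · rcases hg : (a :: as).getLast? with _ | g
            · simp [List.getLast?_eq_none_iff] at hg
            · simp [List.getLast?_cons_cons, hg]
        rw [hl]
      · simp only [loopA, if_neg (fun h => hadj (hcond.mp h))]
        rw [ih]
        have hs : pvSplitRun (pu, pgs) ((u, gs) :: qs) = ([], (u, gs) :: qs) := by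
          simp [pvSplitRun, hadj]
        rw [hs]
        simp only [pvLastU, hs, List.getLast?_nil, Option.getD_none]
        rw [loopB_cons]
        by_cases hcase : pu > su <;> simp [pvEmit, hcase, pvLastU]

-- ---- B side: reduce the cuts pipeline to the same run peeling ----

def pvDfl : Int × (Int × Int) := (0, (0, 0))

-- Nat-level adjacency test at position k
def pvAdjD (ns : List (Int × (Int × Int))) (k : Nat) : Bool :=
  pvAdj (ns.getD k pvDfl) (ns.getD (k + 1) pvDfl)

-- Nat-level cut list
def cutsN (ns : List (Int × (Int × Int))) : List Nat :=
  0 :: (((List.range (ns.length - 1)).filter (fun k => !pvAdjD ns k)).map (· + 1) ++ [ns.length])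

-- Nat-level emission
def emitN (ns : List (Int × (Int × Int))) : List (Int × Int) :=
  (((cutsN ns).zip ((cutsN ns).tail)).filter (fun p => decide (p.1 + 2 ≤ p.2))).map
    (fun p => ((ns.getD p.1 pvDfl).1, (ns.getD (p.2 - 1) pvDfl).1 + 1))

theorem pvKeys_getD (ns : List (Int × (Int × Int))) (s : Int) (k : Nat) (h : k < ns.length) :
    (((PySem.List.enumerate ns s).map (fun ip => pvKeyOf ip.1 ip.2)).getD k (0, 0, 0)) =
      pvKeyOf (s + k) (ns.getD k pvDfl) := by
  induction ns generalizing s k with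
  | nil => simp at h
  | cons x xs ih =>
      rw [PySem.List.enumerate_cons]
      cases k with
      | zero => simp
      | succ k' =>
          simp only [List.map_cons, List.getD_cons_succ]
          rw [ih (s + 1) k' (by simpa using h)]
          congr 1
          push_cast; ring

theorem key_adj (k : Nat) (p q : Int × (Int × Int)) :
    (pvKeyOf ((k : Int) + 1) q == pvKeyOf (k : Int) p) = pvAdj p q := by
  rcases p with ⟨a, b, c⟩; rcases q with ⟨d, e, f⟩
  apply Bool.coe_iff_coe.mp
  simp only [pvKeyOf, pvAdj, beq_iff_eq, Prod.mk.injEq, Bool.and_eq_true]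
  constructor
  · rintro ⟨h1, h2, h3⟩
    refine ⟨⟨by omega, by omega⟩, by omega⟩
  · rintro ⟨⟨h1, h2⟩, h3⟩
    refine ⟨by omega, by omega, by omega⟩

theorem pvCuts_eq (ns : List (Int × (Int × Int))) :
    pvCuts ns = (cutsN ns).map (fun (k : Nat) => (k : Int)) := by
  have hF : (PySem.List.pyRange 1 (ns.length : Int) 1).filter
      (fun i => !(PySem.List.pyGetD (pvKeys ns) i (0, 0, 0) ==
                  PySem.List.pyGetD (pvKeys ns) (i - 1) (0, 0, 0))) =
      ((List.range (ns.length - 1)).filter (fun k => !pvAdjD ns k)).map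
        (fun (k : Nat) => ((k : Int) + 1)) := by
    rw [PySem.List.pyRange_one]
    rw [show (((ns.length : Int) - 1).toNat) = ns.length - 1 by omega]
    rw [List.filter_map]
    rw [List.filter_congr (q := fun k => !pvAdjD ns k)]
    · apply List.map_congr_left
      intro a _
      ring
    · intro k hk
      have hk' : k < ns.length - 1 := List.mem_range.mp hk
      simp only [Function.comp]
      unfold pvKeys
      rw [show (1 : Int) + (k : Int) = (((k + 1 : Nat) : Int)) by push_cast; ring]
      rw [PySem.List.pyGetD_natCast, pvKeys_getD ns 0 (k + 1) (by omega)]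
      rw [show (((k + 1 : Nat) : Int) - 1) = ((k : Nat) : Int) by push_cast; ring]
      rw [PySem.List.pyGetD_natCast, pvKeys_getD ns 0 k (by omega)]
      rw [show (0 : Int) + ((k + 1 : Nat) : Int) = ((k : Int) + 1) by push_cast; ring]
      rw [show (0 : Int) + ((k : Nat) : Int) = ((k : Nat) : Int) by ring]
      rw [key_adj]
      rfl
  unfold pvCuts cutsN
  rw [hF]
  have hmap : List.map ((fun (k : Nat) => (k : Int)) ∘ fun x => x + 1)
      ((List.range (ns.length - 1)).filter (fun k => !pvAdjD ns k)) =
      List.map (fun (k : Nat) => (k : Int) + 1)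
      ((List.range (ns.length - 1)).filter (fun k => !pvAdjD ns k)) := by
    apply List.map_congr_left
    intro a _
    simp only [Function.comp]
    push_cast; ring
  simp [hmap]

-- the Int pipeline over cast cuts equals the Nat pipeline
theorem intPipeline (ns : List (Int × (Int × Int))) (c : List Nat) :
    (((c.map (fun (k : Nat) => (k : Int))).zip ((c.map (fun (k : Nat) => (k : Int))).tail)).filter
        (fun p => decide (2 ≤ p.2 - p.1))).map
      (fun p => ((PySem.List.pyGetD ns p.1 (0, (0, 0))).1,
                 (PySem.List.pyGetD ns (p.2 - 1) (0, (0, 0))).1 + 1)) =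
    ((c.zip c.tail).filter (fun p => decide (p.1 + 2 ≤ p.2))).map
      (fun p => ((ns.getD p.1 pvDfl).1, (ns.getD (p.2 - 1) pvDfl).1 + 1)) := by
  rw [show (c.map (fun (k : Nat) => (k : Int))).tail = c.tail.map (fun (k : Nat) => (k : Int)) from
    (List.map_tail ..).symm]
  rw [List.zip_map]
  rw [List.filter_map, List.map_map]
  rw [List.filter_congr (q := fun p => decide (p.1 + 2 ≤ p.2))]
  · apply List.map_congr_left
    rintro ⟨s, e⟩ hm
    have hcond : s + 2 ≤ e := by simpa using List.of_mem_filter hm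
    simp only [Function.comp, Prod.map]
    rw [PySem.List.pyGetD_natCast]
    rw [show ((e : Int) - 1) = (((e - 1 : Nat)) : Int) by omega]
    rw [PySem.List.pyGetD_natCast]
    rfl
  · rintro ⟨s, e⟩ _
    simp only [Function.comp, Prod.map]
    rw [decide_eq_decide]
    omega

theorem pvBcore_eq_emitN (ns : List (Int × (Int × Int))) : pvBcore ns = emitN ns := by
  unfold pvBcore emitN
  rw [pvCuts_eq, PySem.List.slice_from_one, intPipeline]

-- ---- structural facts about pvSplitRun ----

theorem pvSplitRun_append (p : Int × (Int × Int)) (xs : List (Int × (Int × Int))) :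
    (pvSplitRun p xs).1 ++ (pvSplitRun p xs).2 = xs := by
  induction xs generalizing p with
  | nil => simp [pvSplitRun]
  | cons q qs ih =>
      simp only [pvSplitRun]
      split
      · simpa using ih q
      · simp

theorem pvSplitRun_chain (p : Int × (Int × Int)) (xs : List (Int × (Int × Int))) :
    List.IsChain (fun a b => pvAdj a b = true) (p :: (pvSplitRun p xs).1) := by
  induction xs generalizing p with
  | nil =>
      simp only [pvSplitRun]
      exact List.isChain_singleton p
  | cons q qs ih =>
      simp only [pvSplitRun]
      split
      · rename_i hadj
        exact List.isChain_cons_cons.mpr ⟨hadj, ih q⟩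
      · exact List.isChain_singleton p

theorem pvSplitRun_max (p : Int × (Int × Int)) (xs : List (Int × (Int × Int)))
    (y : Int × (Int × Int)) (t : List (Int × (Int × Int)))
    (h : (pvSplitRun p xs).2 = y :: t) :
    pvAdj ((p :: (pvSplitRun p xs).1).getLast (by simp)) y = false := by
  induction xs generalizing p with
  | nil => simp [pvSplitRun] at h
  | cons q qs ih =>
      by_cases hadj : pvAdj p q = true
      · have hs1 : (pvSplitRun p (q :: qs)).1 = q :: (pvSplitRun q qs).1 := by
          simp [pvSplitRun, hadj]
        have hs2 : (pvSplitRun p (q :: qs)).2 = (pvSplitRun q qs).2 := by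
          simp [pvSplitRun, hadj]
        rw [hs2] at h
        have := ih q h
        rw [hs1, List.getLast_cons (by simp)]
        exact this
      · have hs1 : (pvSplitRun p (q :: qs)).1 = [] := by simp [pvSplitRun, hadj]
        have hs2 : (pvSplitRun p (q :: qs)).2 = q :: qs := by simp [pvSplitRun, hadj]
        rw [hs2] at h
        rw [hs1]
        simp only [List.getLast_singleton]
        injection h with h1 h2
        rw [← h1]
        exact Bool.eq_false_iff.mpr hadj

-- getLast of (x :: run) as the getLast?-getD form used by pvLastU
theorem getLast_cons_eq_getD (x : Int × (Int × Int)) (run : List (Int × (Int × Int))) :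
    (x :: run).getLast (by simp) = run.getLast?.getD x := by
  cases run with
  | nil => simp
  | cons a t =>
      rw [List.getLast_cons (by simp)]
      rw [List.getLast?_eq_some_getLast (by simp)]
      rfl

-- reading (x :: xs) at an index inside / at the end of / after the run
theorem split_getD_left (x : Int × (Int × Int)) (xs : List (Int × (Int × Int))) (k : Nat)
    (h : k < (pvSplitRun x xs).1.length + 1) :
    (x :: xs).getD k pvDfl = (x :: (pvSplitRun x xs).1).getD k pvDfl := by
  conv_lhs => rw [show x :: xs = (x :: (pvSplitRun x xs).1) ++ (pvSplitRun x xs).2 by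
    simp [pvSplitRun_append]]
  rw [List.getD_append _ _ _ _ (by simpa using h)]

theorem split_getD_right (x : Int × (Int × Int)) (xs : List (Int × (Int × Int))) (s : Nat) :
    (x :: xs).getD ((pvSplitRun x xs).1.length + 1 + s) pvDfl =
      (pvSplitRun x xs).2.getD s pvDfl := by
  conv_lhs => rw [show x :: xs = (x :: (pvSplitRun x xs).1) ++ (pvSplitRun x xs).2 by
    simp [pvSplitRun_append]]
  rw [List.getD_append_right _ _ _ _ (by simp)]
  congr 1
  simp

theorem split_getD_last (x : Int × (Int × Int)) (xs : List (Int × (Int × Int))) :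
    (x :: xs).getD ((pvSplitRun x xs).1.length) pvDfl = (pvSplitRun x xs).1.getLast?.getD x := by
  rw [split_getD_left x xs _ (by omega)]
  rw [List.getD_eq_getElem _ _ (by simp)]
  rw [← getLast_cons_eq_getD x (pvSplitRun x xs).1, List.getLast_eq_getElem]
  congr 1

-- ---- cut-list peeling ----

theorem cutsN_peel (x : Int × (Int × Int)) (xs : List (Int × (Int × Int))) :
    cutsN (x :: xs) =
      (if (pvSplitRun x xs).2 = [] then [0, xs.length + 1]
       else 0 :: (cutsN (pvSplitRun x xs).2).map (· + ((pvSplitRun x xs).1.length + 1))) := by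
  set run := (pvSplitRun x xs).1 with hrun
  set rest := (pvSplitRun x xs).2 with hrest
  set ns := x :: xs with hns
  set m := run.length + 1 with hm
  have hlen : ns.length = m + rest.length := by
    rw [hns, show x :: xs = (x :: run) ++ rest by simp [hrun, hrest, pvSplitRun_append]]
    simp only [List.length_append, List.length_cons]
    omega
  -- adjacency holds strictly inside the run
  have hin : ∀ k, k + 1 < m → pvAdjD ns k = true := by
    intro k hk
    have hkk : k + 1 < (pvSplitRun x xs).1.length + 1 := by rw [← hrun]; omega
    have hchain := pvSplitRun_chain x xs
    rw [List.isChain_iff_getElem] at hchain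
    unfold pvAdjD
    rw [hns, split_getD_left x xs k (by omega), split_getD_left x xs (k + 1) (by omega)]
    rw [List.getD_eq_getElem _ _ (by simp; omega),
        List.getD_eq_getElem _ _ (by simp; omega)]
    exact hchain k (by simp; omega)
  have hright : ∀ s : Nat, ns.getD (m + s) pvDfl = rest.getD s pvDfl := by
    intro s
    rw [hns, show m + s = run.length + 1 + s by rw [hm]]
    exact split_getD_right x xs s
  rcases hre : rest with _ | ⟨y, t⟩
  · -- no rest: the whole list is one run, no internal breaks
    rw [if_pos rfl]
    have hm' : ns.length = m := by rw [hlen, hre]; simp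
    unfold cutsN
    have h2 : (List.range (ns.length - 1)).filter (fun k => !pvAdjD ns k) = [] := by
      rw [List.filter_eq_nil_iff]
      intro k hk
      have hk' : k < ns.length - 1 := List.mem_range.mp hk
      have := hin k (by omega)
      simp [this]
    rw [h2]
    have h3 : ns.length = xs.length + 1 := by simp [hns]
    simp [h3]
  · rw [if_neg (by simp), ← hre]
    have hbreak : pvAdjD ns (m - 1) = false := by
      unfold pvAdjD
      have h0 := hright 0
      rw [hre] at h0
      rw [show m - 1 + 1 = m + 0 by omega, h0]
      simp only [List.getD_cons_zero]
      have hl : ns.getD (m - 1) pvDfl = run.getLast?.getD x := by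
        rw [hns, show m - 1 = run.length by omega]
        exact split_getD_last x xs
      rw [hl, ← getLast_cons_eq_getD x run]
      exact pvSplitRun_max x xs y t (by rw [← hrest, hre])
    have hshift : ∀ j : Nat, pvAdjD ns (m + j) = pvAdjD rest j := by
      intro j
      unfold pvAdjD
      rw [show m + j + 1 = m + (j + 1) by omega, hright, hright]
    have hr_len : rest.length = t.length + 1 := by rw [hre]; simp
    have hfilterAll : (List.range (ns.length - 1)).filter (fun k => !pvAdjD ns k) =
        (m - 1) :: ((List.range (rest.length - 1)).filter (fun j => !pvAdjD rest j)).map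
          (fun j => m + j) := by
      rw [show ns.length - 1 = (m - 1) + rest.length by omega]
      rw [List.range_add, List.filter_append]
      have hfirst : (List.range (m - 1)).filter (fun k => !pvAdjD ns k) = [] := by
        rw [List.filter_eq_nil_iff]
        intro k hk
        have hk' : k < m - 1 := List.mem_range.mp hk
        have := hin k (by omega)
        simp [this]
      rw [hfirst, List.nil_append]
      rw [show rest.length = t.length + 1 from hr_len]
      rw [List.range_succ_eq_map, List.map_cons, List.filter_cons]
      rw [show ((m - 1) + 0) = m - 1 by omega]
      rw [if_pos (by simp [hbreak])]
      rw [List.map_map, List.filter_map]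
      simp only [Nat.add_sub_cancel]
      rw [List.filter_congr (q := fun j => !pvAdjD rest j)
        (by intro j _
            simp only [Function.comp, Nat.succ_eq_add_one]
            rw [show (m - 1) + (j + 1) = m + j by omega, hshift])]
      congr 1
      apply List.map_congr_left
      intro j _
      simp only [Function.comp, Nat.succ_eq_add_one]
      omega
    unfold cutsN
    rw [hfilterAll]
    simp only [List.map_cons, List.map_map, List.map_append, List.map_nil, List.cons_append,
      List.cons.injEq, true_and]
    refine ⟨by omega, ?_⟩
    congr 1
    · apply List.map_congr_left
      intro j _
      simp only [Function.comp]
      omega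
    · simp only [List.cons.injEq, and_true]
      omega

theorem emitN_nil : emitN [] = [] := by decide

theorem emitN_peel (x : Int × (Int × Int)) (xs : List (Int × (Int × Int))) :
    emitN (x :: xs) = pvEmit x.1 (pvLastU x xs) ++ emitN (pvSplitRun x xs).2 := by
  set run := (pvSplitRun x xs).1 with hrun
  set rest := (pvSplitRun x xs).2 with hrest
  set m := run.length + 1 with hm
  have hhead : (x :: xs).getD 0 pvDfl = x := by simp
  have hlastD : (x :: xs).getD (m - 1) pvDfl = run.getLast?.getD x := by
    rw [show m - 1 = run.length by omega]
    exact split_getD_last x xs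
  have hEmitHead : (if decide (0 + 2 ≤ m) = true then
        [(((x :: xs).getD 0 pvDfl).1, ((x :: xs).getD (m - 1) pvDfl).1 + 1)] else []) =
      pvEmit x.1 (pvLastU x xs) := by
    rcases hr : run with _ | ⟨a, s⟩
    · rw [if_neg (by simp [hm, hr])]
      unfold pvEmit pvLastU
      rw [← hrun, hr]
      simp
    · have hg : run.getLast? = some ((a :: s).getLast (by simp)) := by
        rw [hr]; exact List.getLast?_eq_some_getLast (by simp)
      have hgt : x.1 < ((a :: s).getLast (by simp)).1 := by
        apply pvSplitRun_last_gt xs x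
        rw [← hrun, hg]
      rw [if_pos (by simp [hm, hr])]
      unfold pvEmit pvLastU
      rw [← hrun, hg]
      rw [if_pos (by simpa using hgt)]
      rw [hhead, hlastD, hg]
  rcases hre : rest with _ | ⟨y, t⟩
  · -- rest empty: the run is all of xs
    have hsp2 : (pvSplitRun x xs).2 = [] := by rw [← hrest]; exact hre
    have hxs : run = xs := by
      have h := pvSplitRun_append x xs
      rw [hsp2, List.append_nil] at h
      rw [hrun, h]
    have hcuts : cutsN (x :: xs) = [0, xs.length + 1] := by
      rw [cutsN_peel, if_pos hsp2]
    conv_lhs => unfold emitN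
    rw [hcuts]
    rw [emitN_nil, List.append_nil]
    have hmx : xs.length + 1 = m := by rw [hm, hxs]
    rw [hmx]
    simp only [List.tail_cons, List.zip_cons_cons, List.zip_nil_right, List.filter_cons,
      List.filter_nil]
    rw [← hEmitHead]
    split
    · simp
    · simp
  · -- rest nonempty
    rw [← hre]
    have hsp2 : (pvSplitRun x xs).2 = y :: t := by rw [← hrest]; exact hre
    have hcuts : cutsN (x :: xs) = 0 :: (cutsN rest).map (· + m) := by
      rw [cutsN_peel, if_neg (by rw [hsp2]; simp)]
    obtain ⟨z, hz⟩ : ∃ z, cutsN rest = 0 :: z :=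
      ⟨(((List.range (rest.length - 1)).filter (fun k => !pvAdjD rest k)).map (· + 1) ++
        [rest.length]), rfl⟩
    have hrec : List.map
        (fun p => (((x :: xs).getD p.1 pvDfl).1, ((x :: xs).getD (p.2 - 1) pvDfl).1 + 1))
        (List.filter (fun p => decide (p.1 + 2 ≤ p.2))
          ((m :: z.map (· + m)).zip (z.map (· + m)))) = emitN rest := by
      have hzip : (m :: z.map (· + m)).zip (z.map (· + m)) =
          ((0 :: z).zip z).map (Prod.map (· + m) (· + m)) := by
        rw [show (m :: z.map (· + m)) = (0 :: z).map (· + m) by simp]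
        exact List.zip_map ..
      rw [hzip, List.filter_map, List.map_map]
      rw [List.filter_congr (q := fun p => decide (p.1 + 2 ≤ p.2))
        (by rintro ⟨s, e⟩ _; simp only [Function.comp, Prod.map]; rw [decide_eq_decide]; omega)]
      conv_rhs => unfold emitN
      rw [hz]
      simp only [List.tail_cons]
      apply List.map_congr_left
      rintro ⟨s, e⟩ hmem
      have hcond : s + 2 ≤ e := by simpa using List.of_mem_filter hmem
      simp only [Function.comp, Prod.map]
      have h1 : (x :: xs).getD (s + m) pvDfl = rest.getD s pvDfl := by
        rw [show s + m = run.length + 1 + s by omega, hrun, hrest]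
        exact split_getD_right x xs s
      have h2 : (x :: xs).getD (e + m - 1) pvDfl = rest.getD (e - 1) pvDfl := by
        rw [show e + m - 1 = run.length + 1 + (e - 1) by omega, hrun, hrest]
        exact split_getD_right x xs (e - 1)
      rw [h1, h2]
    conv_lhs => unfold emitN
    rw [hcuts, hz]
    simp only [List.map_cons, Nat.zero_add, List.tail_cons, List.zip_cons_cons, List.filter_cons]
    by_cases hck : (0 : Nat) + 2 ≤ m
    · rw [if_pos (by simpa using hck), List.map_cons, hrec]
      rw [← hEmitHead, if_pos (by simpa using hck)]
      simp
    · rw [if_neg (by simpa using hck), hrec]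
      rw [← hEmitHead, if_neg (by simpa using hck)]
      simp

theorem loopB_eq_emitN : ∀ ns : List (Int × (Int × Int)), loopB ns = emitN ns := by
  have key : ∀ n (ns : List (Int × (Int × Int))), ns.length ≤ n → loopB ns = emitN ns := by
    intro n
    induction n with
    | zero =>
        intro ns hle
        have h0 : ns = [] := List.length_eq_zero_iff.mp (by omega)
        subst h0
        rw [loopB_nil, emitN_nil]
    | succ n ih =>
        intro ns hle
        rcases ns with _ | ⟨x, xs⟩
        · rw [loopB_nil, emitN_nil]
        · rw [loopB_cons, emitN_peel]
          congr 1
          apply ih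
          have := pvSplitRun_rest_length x xs
          simp at hle
          omega
  intro ns
  exact key ns.length ns le_rfl

-- ===== VERDICT (by name: the statement is the Claim_ definition above) =====
theorem find_easy_ranges_count_two_py_spec : Claim_equal_find_easy_ranges_count_two_py := by
  intro l _
  unfold Spec_find_easy_ranges_count_two_py find_easy_ranges_count_two_py
    find_easy_ranges_count_two_py_alt
  by_cases hl : l = []
  · simp [hl]
  · rw [if_neg hl, if_neg hl]
    rcases hN : PySem.List.sorted (l.map pvNorm) pvKey false with _ | ⟨h, t⟩
    · rw [pvBcore_eq_emitN, ← loopB_eq_emitN, loopB_nil]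
    · rcases h with ⟨hu, hgs⟩
      rw [show (match (hu, hgs) :: t with
            | [] => ([] : List (Int × Int))
            | h :: t => loopA t [] h.1 h.2 h.1 h.2 (h.2.1 - h.1, h.2.2 - h.1)) =
          loopA t [] hu hgs hu hgs (hgs.1 - hu, hgs.2 - hu) from rfl]
      rw [loopA_eq]
      simp only [List.nil_append]
      rw [show pvEmit hu (pvLastU (hu, hgs) t) = pvEmit (hu, hgs).1 (pvLastU (hu, hgs) t)
        from rfl]
      rw [← loopB_cons, loopB_eq_emitN, pvBcore_eq_emitN]
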